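-- pv_equiv track=rewrite | github.com/carothersresearch/pyrfold | pyrfold/hyak/_convert.py | generate_dot_bracket
-- ===== SOURCE A (Python) =====
-- def generate_dot_bracket(helixpositionlistoflist, helixindexlistoflists, sequencelist, dictofknots={}):
--     previoushelixrightbound = 0
--     dotbracket = ''
--     for helixposition in helixpositionlistoflist:
--         dotbracket = dotbracket + '.' * (helixposition[0] -
--                                                     previoushelixrightbound )
--         #look for helix index set that contains a value within the bounds of
--         #helix position
--         for helixpair in helixindexlistoflists:
--             if helixposition[0] <= helixpair[0] <= helixposition[1]:
--                 if helixpair in dictofknots: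
--                     dotbracket = dotbracket + \
--                     (dictofknots[helixpair][0]*(helixposition[1] -
--                                                        helixposition[0] + 1))
--                 else:
--                     #Have found the left bound (
--                     dotbracket = dotbracket + ('('*(helixposition[1] -
--                                                        helixposition[0] + 1))
--             elif helixposition[0] <= helixpair[1] <= helixposition[1]:
--                 #do something with )
--                 if helixpair in dictofknots:
--                     dotbracket = dotbracket + \
--                     (dictofknots[helixpair][1]*(helixposition[1] -
--                                                        helixposition[0] + 1))
--                 else:
--                     dotbracket = dotbracket + (')'*(helixposition[1] -
--                                                        helixposition[0] + 1))
--         previoushelixrightbound = helixposition[1] +1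
--     if len(sequencelist) > len(dotbracket):
--         dotbracket = dotbracket + '.'*(len(sequencelist) - len(dotbracket))
--      #cycle through interactions to determine if brackets match up
--     # for i, base in sequencelist:
--     #     print ''.join(sequencelist)
--     # print dotbracket
--     # for i, x in enumerate(structurelist):
--     #    print str(i), sequencelist[i], structurelist[i], helixlist[i], dotbracket[i]
--     return ''.join(sequencelist), dotbracket
-- ===== SOURCE B (Python) =====
-- def generate_dot_bracket(helixpositionlistoflist, helixindexlistoflists, sequencelist, dictofknots={}):
--     # Transposed traversal: iterate pairs once in the OUTER loop, distributing each
--     # pair's run into a per-position bucket; then emit gaps and buckets in one join.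
--     def contrib(a, b, pair, knot):
--         n = b - a + 1
--         if a <= pair[0] <= b:
--             return [(knot[0] if knot is not None else '(') * n]
--         if a <= pair[1] <= b:
--             return [(knot[1] if knot is not None else ')') * n]
--         return []
--     buckets = [[] for _ in helixpositionlistoflist]
--     for pair in helixindexlistoflists:
--         knot = dictofknots.get(pair)
--         buckets = [bk + contrib(a, b, pair, knot)
--                    for (a, b), bk in zip(helixpositionlistoflist, buckets)]
--     pieces = []
--     prev = 0
--     for (a, b), bk in zip(helixpositionlistoflist, buckets):
--         pieces.append('.' * (a - prev))
--         pieces.extend(bk)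
--         prev = b + 1
--     dotbracket = ''.join(pieces)
--     pad = len(sequencelist) - len(dotbracket)
--     if pad > 0:
--         dotbracket += '.' * pad
--     return ''.join(sequencelist), dotbracket
-- ===== Notes on version B (the rewrite author's own statement) =====
-- stated objective: alternative
-- what changed: B transposes the traversal: the outer loop runs once over the helix pairs, distributing each pair's bracket run into a per-position bucket (one dict lookup per pair instead of per position-pair combination), and the dot-bracket string is assembled in a single final join of gaps and buckets instead of A's repeated string concatenation inside a per-position inner scan.
import Mathlib
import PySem

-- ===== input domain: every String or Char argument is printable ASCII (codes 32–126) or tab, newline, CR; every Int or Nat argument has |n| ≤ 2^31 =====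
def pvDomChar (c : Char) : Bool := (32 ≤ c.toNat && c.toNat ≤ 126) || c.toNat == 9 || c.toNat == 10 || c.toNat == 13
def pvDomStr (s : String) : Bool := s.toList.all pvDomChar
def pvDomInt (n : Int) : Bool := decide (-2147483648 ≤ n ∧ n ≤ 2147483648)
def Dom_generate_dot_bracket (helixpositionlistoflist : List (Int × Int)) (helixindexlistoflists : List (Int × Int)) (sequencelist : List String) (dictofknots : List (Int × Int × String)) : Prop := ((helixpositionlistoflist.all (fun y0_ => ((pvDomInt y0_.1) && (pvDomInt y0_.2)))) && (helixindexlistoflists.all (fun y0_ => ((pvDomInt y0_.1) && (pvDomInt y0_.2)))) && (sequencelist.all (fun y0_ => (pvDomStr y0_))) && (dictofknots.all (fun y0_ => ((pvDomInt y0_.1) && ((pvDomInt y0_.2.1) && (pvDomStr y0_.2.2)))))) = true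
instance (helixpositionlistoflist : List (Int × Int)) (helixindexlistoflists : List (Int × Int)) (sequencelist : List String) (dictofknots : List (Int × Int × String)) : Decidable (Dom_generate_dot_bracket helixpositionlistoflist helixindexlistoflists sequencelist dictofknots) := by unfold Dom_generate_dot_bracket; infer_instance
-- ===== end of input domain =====

-- B traverses the data transposed (outer loop over helix pairs, per-position buckets,
-- one final join) instead of A's per-position inner scan with string accumulation;
-- objective: alternative (same asymptotic cost, single dict lookup per pair).

-- ===== PORT A =====
-- the dict parameter as Python receives it (insertion order, later duplicate keys overwrite)
def pvKnotDict (dictofknots : List (Int × Int × String)) : PySem.Dict (Int × Int) String :=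
  PySem.Dict.ofList (dictofknots.map (fun t => ((t.1, t.2.1), t.2.2)))

-- dictofknots[helixpair][i] * n ; the `none` case is where Python raises IndexError (excluded by Pre_)
def pvCharRun (s : String) (i : Int) (n : Int) : List Char :=
  match PySem.Str.pyGet? s i with
  | some c => PySem.List.pyRepeat [c] n
  | none => []

def generate_dot_bracket (helixpositionlistoflist : List (Int × Int)) (helixindexlistoflists : List (Int × Int)) (sequencelist : List String) (dictofknots : List (Int × Int × String)) : String × String :=
  let knots := pvKnotDict dictofknots
  let st := helixpositionlistoflist.foldl (fun (st : Int × List Char) pos =>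
    let db := st.2 ++ PySem.List.pyRepeat ['.'] (pos.1 - st.1)
    let db := helixindexlistoflists.foldl (fun db pair =>
      if pos.1 ≤ pair.1 ∧ pair.1 ≤ pos.2 then
        match knots.get? pair with
        | some s => db ++ pvCharRun s 0 (pos.2 - pos.1 + 1)
        | none => db ++ PySem.List.pyRepeat ['('] (pos.2 - pos.1 + 1)
      else if pos.1 ≤ pair.2 ∧ pair.2 ≤ pos.2 then
        match knots.get? pair with
        | some s => db ++ pvCharRun s 1 (pos.2 - pos.1 + 1)
        | none => db ++ PySem.List.pyRepeat [')'] (pos.2 - pos.1 + 1)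
      else db) db
    (pos.2 + 1, db)) (0, [])
  let db := st.2
  let db := if (sequencelist.length : Int) > (db.length : Int)
            then db ++ PySem.List.pyRepeat ['.'] ((sequencelist.length : Int) - (db.length : Int))
            else db
  (PySem.Str.join "" sequencelist, String.ofList db)

-- ===== PORT B =====
-- contrib(a, b, pair, knot) of Source B: the (0- or 1-element) list of runs this pair adds at position (a, b)
def pvContrib (knot : Option String) (pos pair : Int × Int) : List (List Char) :=
  let n := pos.2 - pos.1 + 1
  if pos.1 ≤ pair.1 ∧ pair.1 ≤ pos.2 then
    [match knot with | some s => pvCharRun s 0 n | none => PySem.List.pyRepeat ['('] n]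
  else if pos.1 ≤ pair.2 ∧ pair.2 ≤ pos.2 then
    [match knot with | some s => pvCharRun s 1 n | none => PySem.List.pyRepeat [')'] n]
  else []

def generate_dot_bracket_alt (helixpositionlistoflist : List (Int × Int)) (helixindexlistoflists : List (Int × Int)) (sequencelist : List String) (dictofknots : List (Int × Int × String)) : String × String :=
  let knots := pvKnotDict dictofknots
  let buckets := helixindexlistoflists.foldl (fun bks pair =>
      let knot := knots.get? pair
      (helixpositionlistoflist.zip bks).map (fun pb => pb.2 ++ pvContrib knot pb.1 pair))
    (helixpositionlistoflist.map (fun _ => ([] : List (List Char))))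
  let st := (helixpositionlistoflist.zip buckets).foldl
      (fun (st : Int × List (List Char)) pb =>
        (pb.1.2 + 1, st.2 ++ PySem.List.pyRepeat ['.'] (pb.1.1 - st.1) :: pb.2))
      (0, [])
  let db := st.2.flatten
  let pad := (sequencelist.length : Int) - (db.length : Int)
  let db := if pad > 0 then db ++ PySem.List.pyRepeat ['.'] pad else db
  (PySem.Str.join "" sequencelist, String.ofList db)

-- ===== PRECONDITION & SPEC =====
-- Pre_ excludes exactly the inputs where Python A raises IndexError: a helix position whose
-- bounds capture a pair that is a knot whose string is too short for the indexed character
-- (dictofknots[pair][0] needs length ≥ 1, dictofknots[pair][1] via the elif needs length ≥ 2).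
def Pre_generate_dot_bracket (helixpositionlistoflist : List (Int × Int)) (helixindexlistoflists : List (Int × Int)) (sequencelist : List String) (dictofknots : List (Int × Int × String)) : Prop :=
  ∀ pos ∈ helixpositionlistoflist, ∀ pair ∈ helixindexlistoflists,
    (pos.1 ≤ pair.1 ∧ pair.1 ≤ pos.2 →
       (((pvKnotDict dictofknots).get? pair).all (fun s => 1 ≤ s.length)) = true) ∧
    (¬(pos.1 ≤ pair.1 ∧ pair.1 ≤ pos.2) → (pos.1 ≤ pair.2 ∧ pair.2 ≤ pos.2) →
       (((pvKnotDict dictofknots).get? pair).all (fun s => 2 ≤ s.length)) = true)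
instance (helixpositionlistoflist : List (Int × Int)) (helixindexlistoflists : List (Int × Int)) (sequencelist : List String) (dictofknots : List (Int × Int × String)) : Decidable (Pre_generate_dot_bracket helixpositionlistoflist helixindexlistoflists sequencelist dictofknots) := by unfold Pre_generate_dot_bracket; infer_instance

def pvWitness_generate_dot_bracket : (List (Int × Int)) × (List (Int × Int)) × List String × (List (Int × Int × String)) :=
  ([(1, 3), (5, 7)], [(1, 6), (2, 9)], ["A", "U", "G", "C", "A", "U", "G", "C"], [(2, 9, "[]")])

def Spec_generate_dot_bracket (helixpositionlistoflist : List (Int × Int)) (helixindexlistoflists : List (Int × Int)) (sequencelist : List String) (dictofknots : List (Int × Int × String)) (out : String × String) : Prop := out = generate_dot_bracket_alt helixpositionlistoflist helixindexlistoflists sequencelist dictofknots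
instance (helixpositionlistoflist : List (Int × Int)) (helixindexlistoflists : List (Int × Int)) (sequencelist : List String) (dictofknots : List (Int × Int × String)) (out : String × String) : Decidable (Spec_generate_dot_bracket helixpositionlistoflist helixindexlistoflists sequencelist dictofknots out) := by unfold Spec_generate_dot_bracket; infer_instance

-- ===== CLAIM (what is proved, stated in full; the proofs are below) =====
def Claim_equal_generate_dot_bracket : Prop := ∀ (helixpositionlistoflist : List (Int × Int)) (helixindexlistoflists : List (Int × Int)) (sequencelist : List String) (dictofknots : List (Int × Int × String)), Dom_generate_dot_bracket helixpositionlistoflist helixindexlistoflists sequencelist dictofknots → Pre_generate_dot_bracket helixpositionlistoflist helixindexlistoflists sequencelist dictofknots → Spec_generate_dot_bracket helixpositionlistoflist helixindexlistoflists sequencelist dictofknots (generate_dot_bracket helixpositionlistoflist helixindexlistoflists sequencelist dictofknots)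

-- ===== LEMMAS AND PROOFS =====

-- A's inner scan over the pairs appends exactly the flattened bucket of position pos
lemma inner_eq (knots : PySem.Dict (Int × Int) String) (hi : List (Int × Int))
    (pos : Int × Int) (db : List Char) :
    hi.foldl (fun db pair =>
      if pos.1 ≤ pair.1 ∧ pair.1 ≤ pos.2 then
        match knots.get? pair with
        | some s => db ++ pvCharRun s 0 (pos.2 - pos.1 + 1)
        | none => db ++ PySem.List.pyRepeat ['('] (pos.2 - pos.1 + 1)
      else if pos.1 ≤ pair.2 ∧ pair.2 ≤ pos.2 then
        match knots.get? pair with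
        | some s => db ++ pvCharRun s 1 (pos.2 - pos.1 + 1)
        | none => db ++ PySem.List.pyRepeat [')'] (pos.2 - pos.1 + 1)
      else db) db
    = db ++ ((hi.map (fun pair => pvContrib (knots.get? pair) pos pair)).flatten).flatten := by
  induction hi generalizing db with
  | nil => simp
  | cons pair rest ih =>
    simp only [List.foldl_cons, List.map_cons, List.flatten_cons, List.flatten_append]
    rw [ih]
    have hstep : (if pos.1 ≤ pair.1 ∧ pair.1 ≤ pos.2 then
        match knots.get? pair with
        | some s => db ++ pvCharRun s 0 (pos.2 - pos.1 + 1)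
        | none => db ++ PySem.List.pyRepeat ['('] (pos.2 - pos.1 + 1)
      else if pos.1 ≤ pair.2 ∧ pair.2 ≤ pos.2 then
        match knots.get? pair with
        | some s => db ++ pvCharRun s 1 (pos.2 - pos.1 + 1)
        | none => db ++ PySem.List.pyRepeat [')'] (pos.2 - pos.1 + 1)
      else db) = db ++ (pvContrib (knots.get? pair) pos pair).flatten := by
      unfold pvContrib
      split_ifs with h1 h2 <;> cases knots.get? pair <;> simp
    rw [hstep, List.append_assoc]

-- distributing one pair over all buckets, when the buckets are a map over positions
lemma zipmap_eq (hp : List (Int × Int)) (F : (Int × Int) → List (List Char))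
    (c : (Int × Int) → List (List Char)) :
    (hp.zip (hp.map F)).map (fun pb => pb.2 ++ c pb.1)
      = hp.map (fun pos => F pos ++ c pos) := by
  induction hp with
  | nil => simp
  | cons p t ih => simp [ih]

-- B's bucket fold computes, per position, the in-order list of runs of all pairs
lemma buckets_eq (knots : PySem.Dict (Int × Int) String) (hp hi : List (Int × Int))
    (F : (Int × Int) → List (List Char)) :
    hi.foldl (fun bks pair =>
        (hp.zip bks).map (fun pb => pb.2 ++ pvContrib (knots.get? pair) pb.1 pair))
      (hp.map F)
    = hp.map (fun pos => F pos ++ (hi.map (fun pair => pvContrib (knots.get? pair) pos pair)).flatten) := by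
  induction hi generalizing F with
  | nil => simp
  | cons pair rest ih =>
    simp only [List.foldl_cons, List.map_cons, List.flatten_cons]
    rw [zipmap_eq hp F (fun pos => pvContrib (knots.get? pair) pos pair),
        ih (fun pos => F pos ++ pvContrib (knots.get? pair) pos pair)]
    exact List.map_congr_left (fun pos _ => by rw [List.append_assoc])

-- the two outer folds agree: A's accumulated string is the flattening of B's pieces
lemma outer_eq (hp : List (Int × Int)) (g : (Int × Int) → List (List Char))
    (prev : Int) (db : List Char) (ps : List (List Char)) (h : db = ps.flatten) :
    (hp.foldl (fun (st : Int × List Char) pos =>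
        (pos.2 + 1, st.2 ++ PySem.List.pyRepeat ['.'] (pos.1 - st.1) ++ (g pos).flatten))
      (prev, db)).2
    = ((hp.zip (hp.map g)).foldl (fun (st : Int × List (List Char)) pb =>
        (pb.1.2 + 1, st.2 ++ PySem.List.pyRepeat ['.'] (pb.1.1 - st.1) :: pb.2))
      (prev, ps)).2.flatten := by
  induction hp generalizing prev db ps with
  | nil => simpa using h
  | cons pos t ih =>
    simp only [List.map_cons, List.zip_cons_cons, List.foldl_cons]
    exact ih (pos.2 + 1) _ _ (by simp [h, List.append_assoc])

-- ===== VERDICT (by name: the statement is the Claim_ definition above) =====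
theorem generate_dot_bracket_spec : Claim_equal_generate_dot_bracket := by
  intro hp hi seq dk _ _
  unfold Spec_generate_dot_bracket generate_dot_bracket generate_dot_bracket_alt
  simp only [inner_eq, buckets_eq, List.nil_append]
  rw [← outer_eq hp (fun pos => (List.map (fun pair => pvContrib ((pvKnotDict dk).get? pair) pos pair) hi).flatten) 0 [] [] rfl]
  simp only [gt_iff_lt, Int.sub_pos]
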